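-- pv_equiv track=rewrite | github.com/wyk18703232953/myResearch | codeComplex/data/filteredData/python/quadratic/python_quadratic_0081.py | generate_single_cycle_edges
-- ===== SOURCE A (Python) =====
-- def generate_single_cycle_edges(n):
--     edges = []
--     for i in range(n):
--         edges.append((i, (i + 1) % n))
--     for i in range(n):
--         for j in range(n):
--             if i != j and (i + j) % 5 == 0 and (i, j) not in edges:
--                 edges.append((i, j))
--     return edges
-- ===== SOURCE B (Python) =====
-- def generate_single_cycle_edges(n):
--     buckets = [[k for k in range(n) if k % 5 == r] for r in range(5)]
--     edges = [(i, (i + 1) % n) for i in range(n)]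
--     for i in range(n):
--         for j in buckets[(-i) % 5]:
--             if j != i and j != (i + 1) % n:
--                 edges.append((i, j))
--     return edges
-- ===== Notes on version B (the rewrite author's own statement) =====
-- stated objective: faster
-- what changed: B precomputes residue buckets bucket[r]={k in range(n): k%5==r} and, for each i, emits pairs only from bucket[(-i)%5], replacing both the inner full scan over j and the linear '(i,j) not in edges' membership scan with the direct test j != (i+1)%n.
import Mathlib
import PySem

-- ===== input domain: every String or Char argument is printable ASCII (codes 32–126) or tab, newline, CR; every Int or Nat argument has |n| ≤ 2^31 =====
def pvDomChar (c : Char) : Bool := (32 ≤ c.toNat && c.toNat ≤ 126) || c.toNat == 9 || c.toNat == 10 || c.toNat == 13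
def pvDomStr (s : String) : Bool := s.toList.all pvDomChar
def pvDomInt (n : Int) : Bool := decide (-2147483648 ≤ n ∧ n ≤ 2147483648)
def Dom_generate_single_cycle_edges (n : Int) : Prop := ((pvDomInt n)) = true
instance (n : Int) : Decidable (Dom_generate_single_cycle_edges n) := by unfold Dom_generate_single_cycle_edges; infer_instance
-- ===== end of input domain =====

-- B replaces A's inner full scan and linear '(i,j) not in edges' check with residue
-- buckets bucket[r] = [k in range(n) : k%5==r] and the direct test j != (i+1)%n (faster).

-- ===== PORT A =====
def generate_single_cycle_edges (n : Int) : List (Int × Int) :=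
  let edges := (PySem.List.pyRange 0 n 1).foldl
    (fun acc i => acc ++ [(i, PySem.Int.mod (i + 1) n)]) []
  (PySem.List.pyRange 0 n 1).foldl (fun acc i =>
    (PySem.List.pyRange 0 n 1).foldl (fun acc2 j =>
      if i ≠ j ∧ PySem.Int.mod (i + j) 5 = 0 ∧ (i, j) ∉ acc2
      then acc2 ++ [(i, j)] else acc2) acc) edges

-- ===== PORT B =====
def generate_single_cycle_edges_alt (n : Int) : List (Int × Int) :=
  let buckets := (PySem.List.pyRange 0 5 1).map
    (fun r => (PySem.List.pyRange 0 n 1).filter (fun k => PySem.Int.mod k 5 == r))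
  let edges := (PySem.List.pyRange 0 n 1).map (fun i => (i, PySem.Int.mod (i + 1) n))
  (PySem.List.pyRange 0 n 1).foldl (fun acc i =>
    (PySem.List.pyGetD buckets (PySem.Int.mod (-i) 5) []).foldl (fun acc2 j =>
      if j ≠ i ∧ j ≠ PySem.Int.mod (i + 1) n
      then acc2 ++ [(i, j)] else acc2) acc) edges

-- ===== PRECONDITION & SPEC =====
def Spec_generate_single_cycle_edges (n : Int) (out : List (Int × Int)) : Prop := out = generate_single_cycle_edges_alt n
instance (n : Int) (out : List (Int × Int)) : Decidable (Spec_generate_single_cycle_edges n out) := by unfold Spec_generate_single_cycle_edges; infer_instance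

-- ===== CLAIM (what is proved, stated in full; the proofs are below) =====
def Claim_equal_generate_single_cycle_edges : Prop := ∀ (n : Int), Dom_generate_single_cycle_edges n → Spec_generate_single_cycle_edges n (generate_single_cycle_edges n)

-- ===== LEMMAS AND PROOFS =====

-- the cycle edges produced by the first phase of both programs
def pvCyc (n : Int) : List (Int × Int) :=
  (PySem.List.pyRange 0 n 1).map (fun i => (i, PySem.Int.mod (i + 1) n))

-- the block of pairs A's second phase appends for a fixed outer index i
def pvBlk (n i : Int) : List (Int × Int) :=
  ((PySem.List.pyRange 0 n 1).filter
    (fun j => decide (i ≠ j ∧ PySem.Int.mod (i + j) 5 = 0 ∧ (i, j) ∉ pvCyc n))).map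
    (fun j => (i, j))

lemma pvBlk_fst {n i : Int} {p : Int × Int} (hp : p ∈ pvBlk n i) : p.1 = i := by
  simp only [pvBlk, List.mem_map, List.mem_filter] at hp
  obtain ⟨j, _, rfl⟩ := hp
  rfl

-- A's inner loop: the membership test against the growing list equals the test
-- against the initial list, because within one inner pass distinct j's are appended
lemma innerA (i : Int) (lj : List Int) :
    ∀ (acc : List (Int × Int)), lj.Nodup →
    lj.foldl (fun acc2 j =>
        if i ≠ j ∧ PySem.Int.mod (i + j) 5 = 0 ∧ (i, j) ∉ acc2
        then acc2 ++ [(i, j)] else acc2) acc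
    = acc ++ (lj.filter
        (fun j => decide (i ≠ j ∧ PySem.Int.mod (i + j) 5 = 0 ∧ (i, j) ∉ acc))).map
        (fun j => (i, j)) := by
  induction lj with
  | nil => intro acc _; simp
  | cons j rest ih =>
    intro acc hnd
    have hj : j ∉ rest := (List.nodup_cons.mp hnd).1
    have hrest : rest.Nodup := (List.nodup_cons.mp hnd).2
    by_cases h : i ≠ j ∧ PySem.Int.mod (i + j) 5 = 0 ∧ (i, j) ∉ acc
    · have hfil : rest.filter
          (fun j' => decide (i ≠ j' ∧ PySem.Int.mod (i + j') 5 = 0 ∧ (i, j') ∉ acc ++ [(i, j)]))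
          = rest.filter
          (fun j' => decide (i ≠ j' ∧ PySem.Int.mod (i + j') 5 = 0 ∧ (i, j') ∉ acc)) := by
        apply List.filter_congr
        intro j' hj'
        have hne : j' ≠ j := fun he => hj (he ▸ hj')
        simp [List.mem_append, hne]
      rw [List.foldl_cons, if_pos h, ih (acc ++ [(i, j)]) hrest, hfil,
        List.filter_cons_of_pos (p := fun j =>
          decide (i ≠ j ∧ PySem.Int.mod (i + j) 5 = 0 ∧ (i, j) ∉ acc)) (by simpa using h),
        List.map_cons]
      simp only [List.append_assoc, List.singleton_append]
    · rw [List.foldl_cons, if_neg h, ih acc hrest,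
        List.filter_cons_of_neg (by simpa using h)]

-- A's outer loop, with an invariant: every non-cycle pair already accumulated has a
-- first component that will not recur
lemma outerA (n : Int) (li : List Int) :
    ∀ (ext : List (Int × Int)), li.Nodup → (∀ p ∈ ext, p.1 ∉ li) →
    li.foldl (fun acc i =>
        (PySem.List.pyRange 0 n 1).foldl (fun acc2 j =>
          if i ≠ j ∧ PySem.Int.mod (i + j) 5 = 0 ∧ (i, j) ∉ acc2
          then acc2 ++ [(i, j)] else acc2) acc) (pvCyc n ++ ext)
    = pvCyc n ++ ext ++ li.flatMap (pvBlk n) := by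
  induction li with
  | nil => intro ext _ _; simp
  | cons i rest ih =>
    intro ext hnd hext
    have hi : i ∉ rest := (List.nodup_cons.mp hnd).1
    have hrest : rest.Nodup := (List.nodup_cons.mp hnd).2
    have hRnd : (PySem.List.pyRange 0 n 1).Nodup := PySem.List.nodup_pyRange_one 0 n
    have hstep : (PySem.List.pyRange 0 n 1).foldl (fun acc2 j =>
          if i ≠ j ∧ PySem.Int.mod (i + j) 5 = 0 ∧ (i, j) ∉ acc2
          then acc2 ++ [(i, j)] else acc2) (pvCyc n ++ ext)
        = pvCyc n ++ (ext ++ pvBlk n i) := by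
      rw [innerA i _ _ hRnd]
      have hfil : (PySem.List.pyRange 0 n 1).filter
            (fun j => decide (i ≠ j ∧ PySem.Int.mod (i + j) 5 = 0 ∧ (i, j) ∉ pvCyc n ++ ext))
          = (PySem.List.pyRange 0 n 1).filter
            (fun j => decide (i ≠ j ∧ PySem.Int.mod (i + j) 5 = 0 ∧ (i, j) ∉ pvCyc n)) := by
        apply List.filter_congr
        intro j _
        have hnotext : (i, j) ∉ ext := fun hm => hext _ hm (by simp)
        simp [List.mem_append, hnotext]
      rw [hfil]
      simp [pvBlk, List.append_assoc]
    simp only [List.foldl_cons, hstep]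
    rw [ih (ext ++ pvBlk n i) hrest ?_]
    · simp [List.append_assoc]
    · intro p hp
      rcases List.mem_append.mp hp with hp | hp
      · exact fun hm => hext p hp (List.mem_cons_of_mem _ hm)
      · rw [pvBlk_fst hp]; exact hi

-- membership of a pair with in-range first component in the cycle-edge list
lemma mem_pvCyc {n i : Int} (j : Int) (h0 : 0 ≤ i) (h1 : i < n) :
    (i, j) ∈ pvCyc n ↔ j = PySem.Int.mod (i + 1) n := by
  simp only [pvCyc, List.mem_map, PySem.List.mem_pyRange_one, Prod.mk.injEq]
  constructor
  · rintro ⟨k, _, rfl, rfl⟩; rfl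
  · rintro rfl; exact ⟨i, ⟨h0, h1⟩, rfl, rfl⟩

-- B's bucket lookup for outer index i is the residue-(-i)%5 filter of range(n)
lemma bucketB (n i : Int) :
    PySem.List.pyGetD ((PySem.List.pyRange 0 5 1).map
        (fun r => (PySem.List.pyRange 0 n 1).filter (fun k => PySem.Int.mod k 5 == r)))
      (PySem.Int.mod (-i) 5) []
    = (PySem.List.pyRange 0 n 1).filter
        (fun k => PySem.Int.mod k 5 == PySem.Int.mod (-i) 5) := by
  exact PySem.List.pyGetD_map_pyRange_of_nonneg _ 5 _ []
    (PySem.Int.mod_nonneg _ (by norm_num)) (PySem.Int.mod_lt _ (by norm_num))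

-- per-i agreement of the two second-phase blocks
lemma blk_eq (n i : Int) (h0 : 0 ≤ i) (h1 : i < n) :
    pvBlk n i
    = (((PySem.List.pyRange 0 n 1).filter
          (fun k => PySem.Int.mod k 5 == PySem.Int.mod (-i) 5)).filter
          (fun j => decide (j ≠ i ∧ j ≠ PySem.Int.mod (i + 1) n))).map
        (fun j => (i, j)) := by
  rw [pvBlk, List.filter_filter]
  congr 1
  apply List.filter_congr
  intro j _
  have hm5 : ∀ a : ℤ, PySem.Int.mod a 5 = a % 5 :=
    fun a => PySem.Int.mod_eq_emod_of_pos (by norm_num)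
  rw [Bool.eq_iff_iff]
  simp only [decide_eq_true_eq, Bool.and_eq_true, beq_iff_eq]
  rw [mem_pvCyc j h0 h1, hm5 (i + j), hm5 j, hm5 (-i)]
  constructor
  · rintro ⟨hne, hdvd, hcy⟩
    exact ⟨⟨fun h => hne h.symm, hcy⟩, by omega⟩
  · rintro ⟨⟨hne, hcy⟩, hmod⟩
    exact ⟨fun h => hne h.symm, by omega, hcy⟩

-- B's inner loop as a filter+map
lemma innerB (i m : Int) (lj : List Int) (acc : List (Int × Int)) :
    lj.foldl (fun acc2 j => if j ≠ i ∧ j ≠ m then acc2 ++ [(i, j)] else acc2) acc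
    = acc ++ (lj.filter (fun j => decide (j ≠ i ∧ j ≠ m))).map (fun j => (i, j)) := by
  have : (fun (acc2 : List (Int × Int)) j =>
      if j ≠ i ∧ j ≠ m then acc2 ++ [(i, j)] else acc2)
      = (fun acc2 j => if decide (j ≠ i ∧ j ≠ m) = true then acc2 ++ [(i, j)] else acc2) := by
    funext acc2 j; simp
  rw [this, PySem.List.foldl_append_if]

-- ===== VERDICT (by name: the statement is the Claim_ definition above) =====
theorem generate_single_cycle_edges_spec : Claim_equal_generate_single_cycle_edges := by
  unfold Claim_equal_generate_single_cycle_edges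
  intro n _
  unfold Spec_generate_single_cycle_edges
  unfold generate_single_cycle_edges generate_single_cycle_edges_alt
  simp only []
  rw [PySem.List.foldl_append_singleton_eq_map, List.nil_append, show
      (PySem.List.pyRange 0 n 1).map (fun i => (i, PySem.Int.mod (i + 1) n)) = pvCyc n from rfl]
  rw [show pvCyc n = pvCyc n ++ [] from (List.append_nil _).symm,
    outerA n _ [] (PySem.List.nodup_pyRange_one 0 n) (by simp), List.append_nil]
  -- B side: rewrite bucket lookups and the inner loop, then fold back to a flatMap
  have hB : (PySem.List.pyRange 0 n 1).foldl (fun acc i =>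
        (PySem.List.pyGetD ((PySem.List.pyRange 0 5 1).map
            (fun r => (PySem.List.pyRange 0 n 1).filter (fun k => PySem.Int.mod k 5 == r)))
          (PySem.Int.mod (-i) 5) []).foldl (fun acc2 j =>
            if j ≠ i ∧ j ≠ PySem.Int.mod (i + 1) n then acc2 ++ [(i, j)] else acc2) acc)
        (pvCyc n)
      = pvCyc n ++ (PySem.List.pyRange 0 n 1).flatMap (pvBlk n) := by
    have hcongr : ∀ (acc : List (Int × Int)) (i : Int), i ∈ PySem.List.pyRange 0 n 1 →
        (PySem.List.pyGetD ((PySem.List.pyRange 0 5 1).map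
            (fun r => (PySem.List.pyRange 0 n 1).filter (fun k => PySem.Int.mod k 5 == r)))
          (PySem.Int.mod (-i) 5) []).foldl (fun acc2 j =>
            if j ≠ i ∧ j ≠ PySem.Int.mod (i + 1) n then acc2 ++ [(i, j)] else acc2) acc
        = acc ++ pvBlk n i := by
      intro acc i hi
      have hrange := (PySem.List.mem_pyRange_one).mp hi
      rw [bucketB, innerB, blk_eq n i hrange.1 hrange.2]
    exact (PySem.List.foldl_congr_mem _ _ (fun acc i => acc ++ pvBlk n i) _ hcongr).trans
      (PySem.List.foldl_append_eq_flatMap _ _ _)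
  rw [hB]
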